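-- pv_equiv track=rewrite | github.com/pypi-data/pypi-mirror-141 | packages/xbwt/xbwt-0.0.7-py3-none-any.whl/xbwt/xbwt.py | namingTriplets
-- ===== SOURCE A (Python) =====
-- def namingTriplets(SortedTriplets):
--     """
--     Name each triplet
--
--     Parameters
--     ----------
--     SortedTriplets : list
--         Triplets ordered.
--
--     Returns
--     -------
--     lexName : list
--         Array of tuples, where the first value represents the assigned
--         name, while the second value represents the position of the node
--         in IntNodes that generates the triplet.
--     notUnique : bool
--         False if all assigned names are different, true otherwise.
--     """
--     notUnique = False
--     LexName = []
--     LexName.append([2, SortedTriplets[0][0]])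
--     for i in range(1, len(SortedTriplets)):
--         if SortedTriplets[i-1][1]==SortedTriplets[i][1]:
--             notUnique = True
--             LexName.append([LexName[i-1][0], SortedTriplets[i][0]])
--         else:
--             LexName.append([LexName[i-1][0]+1, SortedTriplets[i][0]])
--     return LexName, notUnique
-- ===== SOURCE B (Python) =====
-- def namingTriplets(SortedTriplets):
--     # Run-grouping pass: scan each maximal run of equal second components,
--     # name the whole run at once, bump the name between runs.
--     n = len(SortedTriplets)
--     LexName = []
--     notUnique = False
--     name = 2
--     i = 0
--     while i < n:
--         j = i + 1
--         while j < n and SortedTriplets[j][1] == SortedTriplets[i][1]: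
--             j += 1
--         for k in range(i, j):
--             LexName.append([name, SortedTriplets[k][0]])
--         if j - i > 1:
--             notUnique = True
--         name += 1
--         i = j
--     return LexName, notUnique
-- ===== Notes on version B (the rewrite author's own statement) =====
-- stated objective: alternative
-- what changed: Replaces the per-index adjacent-pair comparison that copies the previous name out of the output list with a run-grouping scan: an inner loop finds each maximal run of equal second components, the whole run is emitted under one name, and the name is bumped once per run; the empty list (where A raises IndexError) returns ([], False).
import Mathlib
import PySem

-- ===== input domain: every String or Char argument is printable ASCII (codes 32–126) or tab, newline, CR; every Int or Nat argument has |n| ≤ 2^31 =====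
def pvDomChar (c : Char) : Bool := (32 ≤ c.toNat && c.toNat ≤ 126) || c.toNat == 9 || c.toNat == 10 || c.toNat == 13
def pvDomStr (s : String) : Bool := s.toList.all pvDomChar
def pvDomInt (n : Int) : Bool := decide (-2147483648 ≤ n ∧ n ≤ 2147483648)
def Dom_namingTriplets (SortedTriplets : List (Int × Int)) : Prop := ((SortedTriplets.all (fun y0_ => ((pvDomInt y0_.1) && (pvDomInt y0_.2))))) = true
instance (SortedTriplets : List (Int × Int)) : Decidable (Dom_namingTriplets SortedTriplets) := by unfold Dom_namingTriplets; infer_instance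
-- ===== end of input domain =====

-- B replaces A's per-index adjacent-pair comparison with a run-grouping scan
-- (maximal runs of equal keys get one name each); equivalence is proved on
-- nonempty inputs, and on the empty list (where A raises IndexError) B returns ([], false).


-- ===== PORT A =====
-- loop body of 'for i in range(1, len(SortedTriplets))'
def pvBodyA (S : List (Int × Int)) (st : List (List Int) × Bool) (i : Int) : List (List Int) × Bool :=
  let prevName := (PySem.List.pyGetD st.1 (i - 1) []).headD 0   -- LexName[i-1][0] (always in range)
  if (PySem.List.pyGetD S (i - 1) (0, 0)).2 = (PySem.List.pyGetD S i (0, 0)).2 then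
    (st.1 ++ [[prevName, (PySem.List.pyGetD S i (0, 0)).1]], true)
  else
    (st.1 ++ [[prevName + 1, (PySem.List.pyGetD S i (0, 0)).1]], st.2)

def namingTriplets (SortedTriplets : List (Int × Int)) : List (List Int) × Bool :=
  match PySem.List.pyGet? SortedTriplets 0 with
  | none => ([], false)   -- Python raises IndexError here; excluded by Pre_
  | some t0 =>
    (PySem.List.pyRange 1 (SortedTriplets.length : Int) 1).foldl
      (pvBodyA SortedTriplets) ([[2, t0.1]], false)

-- ===== PORT B =====
-- inner 'while j < n and SortedTriplets[j][1] == SortedTriplets[i][1]: j += 1'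
-- (fuel = n - j makes the loop structural; it never runs out within the loop's own bound)
def pvInnerJ (S : List (Int × Int)) (n : Nat) (key : Int) : Nat → Nat → Nat
  | 0, j => j
  | fuel + 1, j =>
    if j < n ∧ (S.getD j (0, 0)).2 = key then pvInnerJ S n key fuel (j + 1) else j

-- outer 'while i < n' loop (fuel = n - i, same guard)
def pvOuter (S : List (Int × Int)) (n : Nat) :
    Nat → Int → (List (List Int) × Bool) → Nat → List (List Int) × Bool
  | 0, _, acc, _ => acc
  | fuel + 1, name, acc, i =>
    if i < n then
      let j := pvInnerJ S n (S.getD i (0, 0)).2 (n - (i + 1)) (i + 1)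
      pvOuter S n fuel (name + 1)
        (acc.1 ++ (List.range' i (j - i)).map (fun k => [name, (S.getD k (0, 0)).1]),
         acc.2 || decide (1 < j - i)) j
    else acc

def namingTriplets_alt (SortedTriplets : List (Int × Int)) : List (List Int) × Bool :=
  pvOuter SortedTriplets SortedTriplets.length SortedTriplets.length 2 ([], false) 0

-- ===== PRECONDITION & SPEC =====
-- Pre_ excludes exactly the empty list, on which A raises IndexError at SortedTriplets[0].
def Pre_namingTriplets (SortedTriplets : List (Int × Int)) : Prop := SortedTriplets ≠ []
instance (SortedTriplets : List (Int × Int)) : Decidable (Pre_namingTriplets SortedTriplets) := by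
  unfold Pre_namingTriplets; infer_instance

def pvWitness_namingTriplets : (List (Int × Int)) := [(0, 0), (1, 0), (2, 1)]

def Spec_namingTriplets (SortedTriplets : List (Int × Int)) (out : List (List Int) × Bool) : Prop :=
  out = namingTriplets_alt SortedTriplets
instance (SortedTriplets : List (Int × Int)) (out : List (List Int) × Bool) :
    Decidable (Spec_namingTriplets SortedTriplets out) := by unfold Spec_namingTriplets; infer_instance

-- ===== CLAIM (what is proved, stated in full; the proofs are below) =====
def Claim_equal_namingTriplets : Prop := ∀ (SortedTriplets : List (Int × Int)), Dom_namingTriplets SortedTriplets → Pre_namingTriplets SortedTriplets → Spec_namingTriplets SortedTriplets (namingTriplets SortedTriplets)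

-- ===== LEMMAS AND PROOFS =====

-- common specification of the tail of the output: pvG name key ts = the output
-- produced after an element with second component 'key' was just named 'name'
def pvG (name : Int) (key : Int) : List (Int × Int) → List (List Int) × Bool
  | [] => ([], false)
  | t :: ts =>
    if t.2 = key then
      ([name, t.1] :: (pvG name key ts).1, true)
    else
      ([name + 1, t.1] :: (pvG (name + 1) t.2 ts).1, (pvG (name + 1) t.2 ts).2)

-- 'fresh group' form: the first element of ts opens a new group named 'name'
def pvGF (name : Int) : List (Int × Int) → List (List Int) × Bool
  | [] => ([], false)
  | t :: ts => ([name, t.1] :: (pvG name t.2 ts).1, (pvG name t.2 ts).2)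

-- A's loop computes pvG, one adjacent comparison at a time
theorem pvFoldA (S : List (Int × Int)) :
    ∀ (ts : List (Int × Int)) (i : Nat) (L : List (List Int)) (b : Bool) (name key : Int),
    1 ≤ i → S.drop i = ts → L.length = i →
    (L.getD (i - 1) []).headD 0 = name → (S.getD (i - 1) (0, 0)).2 = key →
    (PySem.List.pyRange (i : Int) (S.length : Int) 1).foldl (pvBodyA S) (L, b)
      = (L ++ (pvG name key ts).1, b || (pvG name key ts).2) := by
  intro ts
  induction ts with
  | nil =>
    intro i L b name key hi hdrop hlen hlast hkey
    have hle : S.length ≤ i := by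
      have := congrArg List.length hdrop
      simp at this
      omega
    rw [PySem.List.pyRange_one_eq_nil (by exact_mod_cast hle)]
    simp [pvG]
  | cons t ts ih =>
    intro i L b name key hi hdrop hlen hlast hkey
    have hlt : i < S.length := by
      have := congrArg List.length hdrop
      simp at this
      omega
    have hcons := List.drop_eq_getElem_cons hlt
    rw [hcons] at hdrop
    have ht : S[i] = t := (List.cons.injEq _ _ _ _ ▸ hdrop).1
    have hts : S.drop (i + 1) = ts := (List.cons.injEq _ _ _ _ ▸ hdrop).2
    have hgi : S.getD i (0, 0) = t := by rw [List.getD_eq_getElem S (0, 0) hlt, ht]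
    rw [PySem.List.pyRange_one_cons (by exact_mod_cast hlt)]
    simp only [List.foldl_cons]
    have e1 : ((i : Int) - 1) = ((i - 1 : Nat) : Int) := by omega
    have ebody : pvBodyA S (L, b) (i : Int) =
        if key = t.2 then (L ++ [[name, t.1]], true) else (L ++ [[name + 1, t.1]], b) := by
      simp only [pvBodyA, e1, PySem.List.pyGetD_natCast, hlast, hkey, hgi]
    by_cases hk : t.2 = key
    · rw [ebody, if_pos hk.symm]
      have hcast : ((i : Int) + 1) = ((i + 1 : Nat) : Int) := by push_cast; ring
      rw [hcast, ih (i + 1) (L ++ [[name, t.1]]) true name t.2 (by omega) hts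
        (by simp [hlen])
        (by simp only [Nat.add_sub_cancel, ← hlen]
            simp)
        (by rw [Nat.add_sub_cancel, hgi])]
      simp [pvG, hk, List.append_assoc]
    · rw [ebody, if_neg (fun h => hk h.symm)]
      have hcast : ((i : Int) + 1) = ((i + 1 : Nat) : Int) := by push_cast; ring
      rw [hcast, ih (i + 1) (L ++ [[name + 1, t.1]]) b (name + 1) t.2 (by omega) hts
        (by simp [hlen])
        (by simp only [Nat.add_sub_cancel, ← hlen]
            simp)
        (by rw [Nat.add_sub_cancel, hgi])]
      simp [pvG, hk, List.append_assoc]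

theorem A_eq_GF (S : List (Int × Int)) (h : S ≠ []) : namingTriplets S = pvGF 2 S := by
  match S with
  | t0 :: ts =>
    show namingTriplets (t0 :: ts) = pvGF 2 (t0 :: ts)
    have h0 : PySem.List.pyGet? (t0 :: ts) (0 : Int) = some t0 := by
      simp [PySem.List.pyGet?, PySem.List.pyIdx?]
    rw [namingTriplets, h0]
    have := pvFoldA (t0 :: ts) ts 1 [[2, t0.1]] false 2 t0.2
      (by omega) (by simp) (by simp) (by simp) (by simp)
    simp only [List.length_cons] at this ⊢
    push_cast at this ⊢
    rw [this]
    simp [pvGF]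

-- pvG over a maximal run of equal keys
theorem pvG_run (name key : Int) (ts : List (Int × Int)) :
    pvG name key ts =
      ((ts.takeWhile (fun u => u.2 == key)).map (fun u => ([name, u.1] : List Int))
          ++ (pvGF (name + 1) (ts.dropWhile (fun u => u.2 == key))).1,
        (!(ts.takeWhile (fun u => u.2 == key)).isEmpty)
          || (pvGF (name + 1) (ts.dropWhile (fun u => u.2 == key))).2) := by
  induction ts with
  | nil => simp [pvG, pvGF]
  | cons t ts ih =>
    by_cases h : t.2 = key
    · simp only [pvG, List.takeWhile_cons, List.dropWhile_cons, h, beq_self_eq_true,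
        if_pos, ih]
      simp
    · have hb : (t.2 == key) = false := by simp [h]
      simp [pvG, if_neg h, hb, pvGF]

-- the inner while loop finds the end of the current run
theorem pvInnerJ_eq (S : List (Int × Int)) (key : Int) :
    ∀ (fuel j : Nat), S.length - j ≤ fuel →
    pvInnerJ S S.length key fuel j
      = j + ((S.drop j).takeWhile (fun u => u.2 == key)).length := by
  intro fuel
  induction fuel with
  | zero =>
    intro j hf
    have : S.drop j = [] := List.drop_eq_nil_of_le (by omega)
    simp [pvInnerJ, this]
  | succ fuel ih =>
    intro j hf
    rw [pvInnerJ]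
    split
    · rename_i h
      have hj : j < S.length := h.1
      have hgj : S.getD j (0, 0) = S[j] := List.getD_eq_getElem S (0, 0) hj
      have hb : (S[j].2 == key) = true := by rw [beq_iff_eq, ← hgj]; exact h.2
      rw [List.drop_eq_getElem_cons hj, List.takeWhile_cons, hb]
      rw [ih (j + 1) (by omega)]
      simp
      omega
    · rename_i h
      by_cases hj : j < S.length
      · have hgj : S.getD j (0, 0) = S[j] := List.getD_eq_getElem S (0, 0) hj
        have hb : (S[j].2 == key) = false := by
          rw [beq_eq_false_iff_ne, ← hgj]
          exact fun he => h ⟨hj, he⟩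
        rw [List.drop_eq_getElem_cons hj, List.takeWhile_cons, hb]
        simp
      · have : S.drop j = [] := List.drop_eq_nil_of_le (by omega)
        simp [this]

-- emitting a run by indices = mapping over the run
theorem pvRangeMap (S : List (Int × Int)) (name : Int) (m : Nat) :
    ∀ (i : Nat), i + m ≤ S.length →
    (List.range' i m).map (fun k => ([name, (S.getD k (0, 0)).1] : List Int))
      = ((S.drop i).take m).map (fun u => ([name, u.1] : List Int)) := by
  induction m with
  | zero => intro i _; simp
  | succ m ih =>
    intro i hle
    have hlt : i < S.length := by omega
    rw [List.range'_succ, List.drop_eq_getElem_cons hlt, List.take_succ_cons]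
    simp only [List.map_cons, List.getD_eq_getElem S (0, 0) hlt, ih (i + 1) (by omega)]

-- the outer loop computes pvGF on the remaining suffix
theorem pvOuter_eq (S : List (Int × Int)) :
    ∀ (fuel i : Nat) (L : List (List Int)) (b : Bool) (name : Int), S.length - i ≤ fuel →
    pvOuter S S.length fuel name (L, b) i
      = (L ++ (pvGF name (S.drop i)).1, b || (pvGF name (S.drop i)).2) := by
  intro fuel
  induction fuel with
  | zero =>
    intro i L b name hf
    have hd : S.drop i = [] := List.drop_eq_nil_of_le (by omega)
    simp [pvOuter, hd, pvGF]
  | succ fuel ih =>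
    intro i L b name hf
    rw [pvOuter]
    split
    · rename_i h
      have hgi : S.getD i (0, 0) = S[i] := List.getD_eq_getElem S (0, 0) h
      have hj := pvInnerJ_eq S S[i].2 (S.length - (i + 1)) (i + 1) (by omega)
      set run := ((S.drop (i + 1)).takeWhile (fun u => u.2 == S[i].2)) with hrun
      set rest := ((S.drop (i + 1)).dropWhile (fun u => u.2 == S[i].2)) with hrest
      have hrl : run.length ≤ S.length - (i + 1) := by
        have h1 := (List.takeWhile_prefix (l := S.drop (i + 1))
          (p := fun u => u.2 == S[i].2)).length_le
        simpa using h1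
      have htake : (S.drop (i + 1)).take run.length = run :=
        (List.prefix_iff_eq_take.mp (List.takeWhile_prefix _)).symm
      have hdropj : S.drop (i + 1 + run.length) = rest := by
        have h2 : (S.drop (i + 1)).drop run.length = rest := by
          rw [show S.drop (i + 1) = run ++ rest from (List.takeWhile_append_dropWhile ..).symm,
            List.drop_left]
        rw [List.drop_drop] at h2
        convert h2 using 2
      have hsub : (i + 1 + run.length) - i = 1 + run.length := by omega
      have htk : (S.drop i).take (1 + run.length) = S[i] :: run := by
        rw [List.drop_eq_getElem_cons h, Nat.add_comm, List.take_succ_cons, htake]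
      have hflag : (decide (1 < 1 + run.length)) = !run.isEmpty := by
        cases run <;> simp
      have hGF : pvGF name (S.drop i)
          = ([name, S[i].1] :: ((run.map (fun u => ([name, u.1] : List Int)))
                ++ (pvGF (name + 1) rest).1),
             (!run.isEmpty) || (pvGF (name + 1) rest).2) := by
        rw [List.drop_eq_getElem_cons h]
        simp only [pvGF, pvG_run name S[i].2 (S.drop (i + 1)), ← hrun, ← hrest]
      simp only [hgi, hj, hsub]
      rw [pvRangeMap S name (1 + run.length) i (by omega), htk, hflag,
        ih (i + 1 + run.length) _ _ (name + 1) (by omega), hdropj, hGF]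
      simp [Bool.or_assoc, List.append_assoc]
    · rename_i h
      have hd : S.drop i = [] := List.drop_eq_nil_of_le (by omega)
      simp [hd, pvGF]

theorem B_eq_GF (S : List (Int × Int)) : namingTriplets_alt S = pvGF 2 S := by
  rw [namingTriplets_alt, pvOuter_eq S S.length 0 [] false 2 (by omega)]
  simp

-- ===== VERDICT (by name: the statement is the Claim_ definition above) =====
theorem namingTriplets_spec : Claim_equal_namingTriplets := by
  intro S _ hpre
  unfold Spec_namingTriplets
  rw [A_eq_GF S hpre, B_eq_GF S]
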